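-- pv_equiv track=rewrite | github.com/LittleBigKeith/OCW-MIT-Python-2008 | ps2/src/ps2.py | find_mcnugget_combination_for_generic
-- ===== SOURCE A (Python) =====
-- def find_mcnugget_combination_for_generic(n, packages):
--     combinations = set()
--     boxes_of_a, boxes_of_b, boxes_of_c, total = 0, 0, 0, 0
--     while total < n:
--         while total < n:
--             while total < n:
--                 boxes_of_a += 1
--                 total =  boxes_of_c * packages[2] + boxes_of_b * packages[1] + boxes_of_a * packages[0]
--                 if total == n:
--                     combinations.add((boxes_of_a, boxes_of_b, boxes_of_c))
--             boxes_of_a = 0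
--             boxes_of_b += 1
--             total = boxes_of_c * packages[2] + boxes_of_b * packages[1]
--             if total == n:
--                 combinations.add((boxes_of_a, boxes_of_b, boxes_of_c))
--         boxes_of_a, boxes_of_b = 0, 0
--         boxes_of_c += 1
--         total = boxes_of_c * packages[2]
--         if total == n:
--             combinations.add((boxes_of_a, boxes_of_b, boxes_of_c))
--     return combinations
-- ===== SOURCE B (Python) =====
-- def find_mcnugget_combination_for_generic(n, packages):
--     combinations = set()
--     if n <= 0:
--         return combinations
--     p0, p1, p2 = packages[0], packages[1], packages[2]
--     for boxes_of_c in range(n // p2 + 1):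
--         base = n - boxes_of_c * p2
--         for boxes_of_b in range(base // p1 + 1):
--             rem = base - boxes_of_b * p1
--             if rem % p0 == 0:
--                 combinations.add((rem // p0, boxes_of_b, boxes_of_c))
--     return combinations
-- ===== Notes on version B (the rewrite author's own statement) =====
-- stated objective: alternative
-- what changed: B drops A's unit-step search over boxes_of_a: it iterates only over the c and b counts and solves the a count arithmetically via remainder and divisibility (intended as the asymptotically cheaper algorithm; a timing run could not get a clean reading because A already times out on small n).
import Mathlib
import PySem

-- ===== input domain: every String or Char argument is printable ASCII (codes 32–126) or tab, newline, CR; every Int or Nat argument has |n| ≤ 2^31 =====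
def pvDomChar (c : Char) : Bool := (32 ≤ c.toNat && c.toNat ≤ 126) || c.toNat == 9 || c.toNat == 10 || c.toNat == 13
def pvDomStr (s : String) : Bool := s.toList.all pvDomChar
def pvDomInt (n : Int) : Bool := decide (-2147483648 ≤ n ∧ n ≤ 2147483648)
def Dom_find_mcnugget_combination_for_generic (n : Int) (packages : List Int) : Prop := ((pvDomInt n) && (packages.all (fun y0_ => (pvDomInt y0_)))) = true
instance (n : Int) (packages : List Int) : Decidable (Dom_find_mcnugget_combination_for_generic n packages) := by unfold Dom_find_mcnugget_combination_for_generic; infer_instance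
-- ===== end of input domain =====

-- B replaces A's unit-step inner search for boxes_of_a by a remainder/divisibility computation over the two outer counts only (a different algorithm; same exact result).


-- ===== PORT A =====
-- innermost 'while total < n' loop of A: at its head total = c*p2 + b*p1 + a*p0; the loop
-- returns only the updated set (a and total are reset/overwritten by the caller). Fuel
-- n.toNat+1 is enough on Pre_ since each step raises total by p0 ≥ 1.
def pvInnerA (p0 p1 p2 n b c : Int) : Nat → Int → List (Int × Int × Int) → List (Int × Int × Int)
  | 0, _, combos => combos
  | f + 1, a, combos =>
    if c * p2 + b * p1 + a * p0 < n then
      let a' := a + 1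
      let total := c * p2 + b * p1 + a' * p0
      let combos' := if total = n then PySem.Set.add combos (a', b, c) else combos
      pvInnerA p0 p1 p2 n b c f a' combos'
    else combos

-- middle 'while total < n' loop of A: at its head total = c*p2 + b*p1
def pvMiddleA (p0 p1 p2 n c : Int) : Nat → Int → List (Int × Int × Int) → List (Int × Int × Int)
  | 0, _, combos => combos
  | f + 1, b, combos =>
    if c * p2 + b * p1 < n then
      let combos1 := pvInnerA p0 p1 p2 n b c (n.toNat + 1) 0 combos
      let b' := b + 1
      let combos2 := if c * p2 + b' * p1 = n then PySem.Set.add combos1 (0, b', c) else combos1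
      pvMiddleA p0 p1 p2 n c f b' combos2
    else combos

-- outer 'while total < n' loop of A: at its head total = c*p2
def pvOuterA (p0 p1 p2 n : Int) : Nat → Int → List (Int × Int × Int) → List (Int × Int × Int)
  | 0, _, combos => combos
  | f + 1, c, combos =>
    if c * p2 < n then
      let combos1 := pvMiddleA p0 p1 p2 n c (n.toNat + 1) 0 combos
      let c' := c + 1
      let combos2 := if c' * p2 = n then PySem.Set.add combos1 (0, 0, c') else combos1
      pvOuterA p0 p1 p2 n f c' combos2
    else combos

-- packages[0], packages[1], packages[2]; A raises IndexError only when n > 0 and the list is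
-- shorter than 3 (excluded by Pre_), so the pyGetD defaults are never reached inside Pre_.
def find_mcnugget_combination_for_generic (n : Int) (packages : List Int) : List (Int × Int × Int) :=
  pvOuterA (PySem.List.pyGetD packages 0 0) (PySem.List.pyGetD packages 1 0)
    (PySem.List.pyGetD packages 2 0) n (n.toNat + 1) 0 []

-- ===== PORT B =====
def find_mcnugget_combination_for_generic_alt (n : Int) (packages : List Int) : List (Int × Int × Int) :=
  if n ≤ 0 then []
  else
    let p0 := PySem.List.pyGetD packages 0 0
    let p1 := PySem.List.pyGetD packages 1 0
    let p2 := PySem.List.pyGetD packages 2 0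
    (PySem.List.pyRange 0 (PySem.Int.floordiv n p2 + 1) 1).foldl (fun combos c =>
      (PySem.List.pyRange 0 (PySem.Int.floordiv (n - c * p2) p1 + 1) 1).foldl (fun combos b =>
        if PySem.Int.mod (n - c * p2 - b * p1) p0 = 0 then
          PySem.Set.add combos (PySem.Int.floordiv (n - c * p2 - b * p1) p0, b, c)
        else combos) combos) []

-- ===== PRECONDITION & SPEC =====
-- Pre_: exactly where A terminates normally: either n ≤ 0 (A returns the empty set without
-- touching packages), or packages has at least three entries and the first three are positive
-- (otherwise A raises IndexError or loops forever).
def Pre_find_mcnugget_combination_for_generic (n : Int) (packages : List Int) : Prop :=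
  n ≤ 0 ∨ (3 ≤ packages.length ∧ 0 < PySem.List.pyGetD packages 0 0 ∧
    0 < PySem.List.pyGetD packages 1 0 ∧ 0 < PySem.List.pyGetD packages 2 0)
instance (n : Int) (packages : List Int) : Decidable (Pre_find_mcnugget_combination_for_generic n packages) := by unfold Pre_find_mcnugget_combination_for_generic; infer_instance

def pvWitness_find_mcnugget_combination_for_generic : Int × List Int := (13, [2, 3, 5])

def Spec_find_mcnugget_combination_for_generic (n : Int) (packages : List Int) (out : List (Int × Int × Int)) : Prop := out = find_mcnugget_combination_for_generic_alt n packages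
instance (n : Int) (packages : List Int) (out : List (Int × Int × Int)) : Decidable (Spec_find_mcnugget_combination_for_generic n packages out) := by unfold Spec_find_mcnugget_combination_for_generic; infer_instance

-- ===== CLAIM (what is proved, stated in full; the proofs are below) =====
def Claim_equal_find_mcnugget_combination_for_generic : Prop := ∀ (n : Int) (packages : List Int), Dom_find_mcnugget_combination_for_generic n packages → Pre_find_mcnugget_combination_for_generic n packages → Spec_find_mcnugget_combination_for_generic n packages (find_mcnugget_combination_for_generic n packages)

-- ===== LEMMAS AND PROOFS =====
theorem pvInnerA_char (p0 p1 p2 n b c : Int) (hp0 : 1 ≤ p0) :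
    ∀ (f : Nat) (a : Int) (combos : List (Int × Int × Int)),
      (n - (c * p2 + b * p1 + a * p0)).toNat < f →
      pvInnerA p0 p1 p2 n b c f a combos =
        if 0 < n - (c * p2 + b * p1 + a * p0) ∧ p0 ∣ (n - (c * p2 + b * p1 + a * p0)) then
          PySem.Set.add combos
            (a + PySem.Int.floordiv (n - (c * p2 + b * p1 + a * p0)) p0, b, c)
        else combos := by
  intro f
  induction f with
  | zero => intro a combos hf; omega
  | succ f ih =>
    intro a combos hf
    have key : c * p2 + b * p1 + (a + 1) * p0 = c * p2 + b * p1 + a * p0 + p0 := by ring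
    by_cases hlt : c * p2 + b * p1 + a * p0 < n
    · rw [pvInnerA, if_pos hlt]
      show pvInnerA p0 p1 p2 n b c f (a + 1)
          (if c * p2 + b * p1 + (a + 1) * p0 = n then PySem.Set.add combos (a + 1, b, c)
           else combos) = _
      rw [ih (a + 1) _ (by rw [key]; omega)]
      rw [key]
      by_cases heq : c * p2 + b * p1 + a * p0 + p0 = n
      · have hr : n - (c * p2 + b * p1 + a * p0) = p0 := by omega
        rw [if_pos heq, if_neg (by omega), if_pos ⟨by omega, by rw [hr]⟩, hr,
          PySem.Int.floordiv_eq_ediv_of_pos (by omega), Int.ediv_self (by omega)]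
      · rw [if_neg heq]
        by_cases hpos : 0 < n - (c * p2 + b * p1 + a * p0 + p0)
        · have hiff : p0 ∣ (n - (c * p2 + b * p1 + a * p0 + p0)) ↔
              p0 ∣ (n - (c * p2 + b * p1 + a * p0)) := by
            constructor <;> intro ⟨k, hk⟩
            · exact ⟨k + 1, by rw [Int.mul_add, ← hk]; ring⟩
            · exact ⟨k - 1, by rw [Int.mul_sub, ← hk]; ring⟩
          by_cases hdvd : p0 ∣ (n - (c * p2 + b * p1 + a * p0))
          · rw [if_pos ⟨hpos, hiff.mpr hdvd⟩, if_pos ⟨by omega, hdvd⟩]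
            have h2 : n - (c * p2 + b * p1 + a * p0) =
                (n - (c * p2 + b * p1 + a * p0 + p0)) + 1 * p0 := by ring
            rw [h2, PySem.Int.floordiv_eq_ediv_of_pos (by omega),
              PySem.Int.floordiv_eq_ediv_of_pos (by omega),
              Int.add_mul_ediv_right _ _ (by omega : p0 ≠ 0)]
            congr 2
            ring
          · rw [if_neg (by rw [hiff]; tauto), if_neg (by tauto)]
        · rw [if_neg (by omega)]
          by_cases hdvd : p0 ∣ (n - (c * p2 + b * p1 + a * p0))
          · exact absurd (Int.le_of_dvd (by omega) hdvd) (by omega)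
          · rw [if_neg (by tauto)]
    · rw [pvInnerA, if_neg hlt, if_neg (by omega)]

theorem pvMiddleA_stop (p0 p1 p2 n c b : Int) (f : Nat) (combos : List (Int × Int × Int))
    (h : ¬ c * p2 + b * p1 < n) : pvMiddleA p0 p1 p2 n c f b combos = combos := by
  cases f with
  | zero => rfl
  | succ f => rw [pvMiddleA, if_neg h]

theorem pvMiddleA_char (p0 p1 p2 n c : Int) (hp0 : 1 ≤ p0) (hp1 : 1 ≤ p1)
    (hc : 0 ≤ c * p2) :
    ∀ (f : Nat) (b : Int) (combos : List (Int × Int × Int)),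
      0 ≤ b → c * p2 + b * p1 < n → (n - (c * p2 + b * p1)).toNat < f →
      pvMiddleA p0 p1 p2 n c f b combos =
        (PySem.List.pyRange b (PySem.Int.floordiv (n - c * p2) p1 + 1) 1).foldl
          (fun combos b =>
            if PySem.Int.mod (n - c * p2 - b * p1) p0 = 0 then
              PySem.Set.add combos (PySem.Int.floordiv (n - c * p2 - b * p1) p0, b, c)
            else combos) combos := by
  intro f
  induction f with
  | zero => intro b combos _ _ hf; omega
  | succ f ih =>
    intro b combos hb hbn hf
    have key2 : (b + 1) * p1 = b * p1 + p1 := by ring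
    have key3 : (b + 1 + 1) * p1 = b * p1 + p1 + p1 := by ring
    have hbp1 : 0 ≤ b * p1 := mul_nonneg hb (by omega)
    rw [pvMiddleA, if_pos hbn]
    show pvMiddleA p0 p1 p2 n c f (b + 1)
        (if c * p2 + (b + 1) * p1 = n then
          PySem.Set.add (pvInnerA p0 p1 p2 n b c (n.toNat + 1) 0 combos) (0, b + 1, c)
        else pvInnerA p0 p1 p2 n b c (n.toNat + 1) 0 combos) = _
    rw [pvInnerA_char p0 p1 p2 n b c hp0 (n.toNat + 1) 0 combos (by omega)]
    have e1 : n - (c * p2 + b * p1 + 0 * p0) = n - c * p2 - b * p1 := by ring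
    rw [e1]
    have hfb : (if PySem.Int.mod (n - c * p2 - b * p1) p0 = 0 then
          PySem.Set.add combos (PySem.Int.floordiv (n - c * p2 - b * p1) p0, b, c)
        else combos) =
        (if 0 < n - c * p2 - b * p1 ∧ p0 ∣ (n - c * p2 - b * p1) then
          PySem.Set.add combos (0 + PySem.Int.floordiv (n - c * p2 - b * p1) p0, b, c)
        else combos) := by
      by_cases hdvd : p0 ∣ (n - c * p2 - b * p1)
      · rw [if_pos ((PySem.Int.mod_eq_zero_iff_dvd _ _).mpr hdvd), if_pos ⟨by omega, hdvd⟩,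
          Int.zero_add]
      · rw [if_neg (fun hm => hdvd ((PySem.Int.mod_eq_zero_iff_dvd _ _).mp hm)),
          if_neg (by tauto)]
    have hble : b < PySem.Int.floordiv (n - c * p2) p1 + 1 := by
      have := (@PySem.Int.le_floordiv_iff_mul_le (n - c * p2) p1 b (by omega)).mpr (by omega)
      omega
    rw [PySem.List.pyRange_one_cons hble, List.foldl_cons, ← hfb]
    by_cases h2 : c * p2 + (b + 1) * p1 < n
    · have hfuel : (n - (c * p2 + (b + 1) * p1)).toNat < f := by omega
      rw [if_neg (by omega), ih (b + 1) _ (by omega) h2 hfuel]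
    · by_cases h3 : c * p2 + (b + 1) * p1 = n
      · rw [if_pos h3, pvMiddleA_stop _ _ _ _ _ _ _ _ (by omega)]
        have hhi : PySem.Int.floordiv (n - c * p2) p1 = b + 1 :=
          (PySem.Int.floordiv_eq_iff_of_pos (by omega)).mpr ⟨by omega, by omega⟩
        rw [hhi, PySem.List.pyRange_one_singleton, List.foldl_cons, List.foldl_nil]
        have e2 : n - c * p2 - (b + 1) * p1 = 0 := by omega
        have hfd0 : PySem.Int.floordiv 0 p0 = 0 := by
          rw [PySem.Int.floordiv_eq_ediv_of_pos (by omega : (0:Int) < p0)]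
          exact Int.zero_ediv p0
        rw [e2, if_pos ((PySem.Int.mod_eq_zero_iff_dvd _ _).mpr (dvd_zero p0)), hfd0]
      · rw [if_neg h3, pvMiddleA_stop _ _ _ _ _ _ _ _ (by omega)]
        have hhi : PySem.Int.floordiv (n - c * p2) p1 = b :=
          (PySem.Int.floordiv_eq_iff_of_pos (by omega)).mpr ⟨by omega, by omega⟩
        rw [hhi, PySem.List.pyRange_one_eq_nil (a := b + 1) (b := b + 1) le_rfl,
          List.foldl_nil]

theorem pvOuterA_stop (p0 p1 p2 n c : Int) (f : Nat) (combos : List (Int × Int × Int))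
    (h : ¬ c * p2 < n) : pvOuterA p0 p1 p2 n f c combos = combos := by
  cases f with
  | zero => rfl
  | succ f => rw [pvOuterA, if_neg h]

theorem pvOuterA_char (p0 p1 p2 n : Int) (hp0 : 1 ≤ p0) (hp1 : 1 ≤ p1) (hp2 : 1 ≤ p2) :
    ∀ (f : Nat) (c : Int) (combos : List (Int × Int × Int)),
      0 ≤ c → c * p2 < n → (n - c * p2).toNat < f →
      pvOuterA p0 p1 p2 n f c combos =
        (PySem.List.pyRange c (PySem.Int.floordiv n p2 + 1) 1).foldl
          (fun combos c =>
            (PySem.List.pyRange 0 (PySem.Int.floordiv (n - c * p2) p1 + 1) 1).foldl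
              (fun combos b =>
                if PySem.Int.mod (n - c * p2 - b * p1) p0 = 0 then
                  PySem.Set.add combos (PySem.Int.floordiv (n - c * p2 - b * p1) p0, b, c)
                else combos) combos) combos := by
  intro f
  induction f with
  | zero => intro c combos _ _ hf; omega
  | succ f ih =>
    intro c combos hc hcn hf
    have key2 : (c + 1) * p2 = c * p2 + p2 := by ring
    have key3 : (c + 1 + 1) * p2 = c * p2 + p2 + p2 := by ring
    have hcp2 : 0 ≤ c * p2 := mul_nonneg hc (by omega)
    rw [pvOuterA, if_pos hcn]
    show pvOuterA p0 p1 p2 n f (c + 1)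
        (if (c + 1) * p2 = n then
          PySem.Set.add (pvMiddleA p0 p1 p2 n c (n.toNat + 1) 0 combos) (0, 0, c + 1)
        else pvMiddleA p0 p1 p2 n c (n.toNat + 1) 0 combos) = _
    rw [pvMiddleA_char p0 p1 p2 n c hp0 hp1 hcp2 (n.toNat + 1) 0 combos le_rfl
      (by omega) (by omega)]
    have hcle : c < PySem.Int.floordiv n p2 + 1 := by
      have := (@PySem.Int.le_floordiv_iff_mul_le n p2 c (by omega)).mpr (by omega)
      omega
    rw [PySem.List.pyRange_one_cons hcle, List.foldl_cons]
    by_cases h2 : (c + 1) * p2 < n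
    · have hfuel : (n - (c + 1) * p2).toNat < f := by rw [key2]; omega
      rw [if_neg (by omega), ih (c + 1) _ (by omega) h2 hfuel]
    · by_cases h3 : (c + 1) * p2 = n
      · rw [if_pos h3, pvOuterA_stop _ _ _ _ _ _ _ (by omega)]
        have hhi : PySem.Int.floordiv n p2 = c + 1 :=
          (@PySem.Int.floordiv_eq_iff_of_pos n p2 (c + 1) (by omega)).mpr ⟨by omega, by omega⟩
        rw [hhi, PySem.List.pyRange_one_singleton, List.foldl_cons, List.foldl_nil]
        have e2 : n - (c + 1) * p2 = 0 := by omega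
        rw [e2]
        have hfd01 : PySem.Int.floordiv 0 p1 = 0 := by
          rw [PySem.Int.floordiv_eq_ediv_of_pos (by omega : (0:Int) < p1)]
          exact Int.zero_ediv p1
        rw [hfd01, PySem.List.pyRange_one_singleton, List.foldl_cons, List.foldl_nil]
        have e3 : (0:Int) - 0 * p1 = 0 := by ring
        rw [e3]
        have hfd00 : PySem.Int.floordiv 0 p0 = 0 := by
          rw [PySem.Int.floordiv_eq_ediv_of_pos (by omega : (0:Int) < p0)]
          exact Int.zero_ediv p0
        rw [if_pos ((PySem.Int.mod_eq_zero_iff_dvd _ _).mpr (dvd_zero p0)), hfd00]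
      · rw [if_neg h3, pvOuterA_stop _ _ _ _ _ _ _ (by omega)]
        have hhi : PySem.Int.floordiv n p2 = c :=
          (@PySem.Int.floordiv_eq_iff_of_pos n p2 c (by omega)).mpr ⟨by omega, by omega⟩
        rw [hhi, PySem.List.pyRange_one_eq_nil (a := c + 1) (b := c + 1) le_rfl,
          List.foldl_nil]

-- ===== VERDICT (by name: the statement is the Claim_ definition above) =====
theorem find_mcnugget_combination_for_generic_spec : Claim_equal_find_mcnugget_combination_for_generic := by
  intro n packages _ hpre
  unfold Spec_find_mcnugget_combination_for_generic
  unfold find_mcnugget_combination_for_generic find_mcnugget_combination_for_generic_alt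
  by_cases hn : n ≤ 0
  · rw [if_pos hn, pvOuterA_stop _ _ _ _ _ _ _ (by omega)]
  · obtain ⟨_, h0, h1, h2⟩ := hpre.resolve_left hn
    rw [if_neg hn,
      pvOuterA_char _ _ _ n (by omega) (by omega) (by omega) (n.toNat + 1) 0 [] le_rfl
        (by omega) (by omega)]
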